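-- pv_equiv track=rewrite | github.com/Bhargav-Kiku/Leetcode-Submissions | 3847-find-the-score-difference-in-a-game/3847-find-the-score-difference-in-a-game.py | scoreDifference
-- ===== SOURCE A (Python) =====
-- from typing import List
--
-- def scoreDifference(nums: List[int]) -> int:
--     res = 0
--     f = True
--     for i in range(len(nums)):
--         if (i + 1) % 6 == 0:
--             f = not f
--         if nums[i] & 1:
--             f = not f
--         res += (nums[i] * (1 if f else -1))
--     return res
-- ===== SOURCE B (Python) =====
-- from typing import List
--
-- def scoreDifference(nums: List[int]) -> int:
--     # Right-to-left pass: t is the signed sum of the suffix assuming no odd-value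
--     # toggle happened before it; an odd element negates the whole suffix sum
--     # (a parity flip multiplies every later sign by -1) and the positional sign
--     # is the closed form (-1)**((i+1)//6). No running sign flag at all.
--     t = 0
--     for i, x in reversed(list(enumerate(nums))):
--         base = -1 if ((i + 1) // 6) % 2 else 1
--         t = -base * x - t if x % 2 else base * x + t
--     return t
-- ===== Notes on version B (the rewrite author's own statement) =====
-- stated objective: alternative
-- what changed: B traverses the list right-to-left with no sign flag: it maintains the signed suffix sum, negating the entire accumulated suffix whenever an odd element is met (a parity flip negates all later signs) and taking the positional sign from the closed form (-1)**((i+1)//6), whereas A walks left-to-right toggling a running boolean flag.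
import Mathlib
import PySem

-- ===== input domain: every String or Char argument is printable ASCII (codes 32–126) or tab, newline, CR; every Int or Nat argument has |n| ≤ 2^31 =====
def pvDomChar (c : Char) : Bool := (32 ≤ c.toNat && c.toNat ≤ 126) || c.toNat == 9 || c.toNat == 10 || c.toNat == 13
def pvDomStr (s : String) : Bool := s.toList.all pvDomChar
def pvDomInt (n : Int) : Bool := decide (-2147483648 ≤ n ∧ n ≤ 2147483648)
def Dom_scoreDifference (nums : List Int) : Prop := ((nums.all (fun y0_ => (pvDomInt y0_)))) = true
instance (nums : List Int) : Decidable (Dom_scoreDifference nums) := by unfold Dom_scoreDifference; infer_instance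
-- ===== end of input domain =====

-- B replaces A's forward loop with a running sign flag by a backward pass that keeps the signed
-- suffix sum, negating it at each odd element and using the closed-form positional sign; same O(n).

-- ===== PORT A =====
-- loop over range(len(nums)) with state (res, f); `nums[i] & 1` tested as emod 2 ≠ 0 (exact for divisor 2)
def scoreDifferenceGoA : List Int → Nat → Int → Bool → Int
  | [], _, res, _ => res
  | x :: xs, i, res, f =>
    let f1 := if (i + 1) % 6 == 0 then !f else f
    let f2 := if x % 2 != 0 then !f1 else f1
    scoreDifferenceGoA xs (i + 1) (res + x * (if f2 then 1 else -1)) f2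

def scoreDifference (nums : List Int) : Int := scoreDifferenceGoA nums 0 0 true

-- ===== PORT B =====
-- for i, x in reversed(list(enumerate(nums))): … — a foldl over the reversed enumerate list
def scoreDifference_alt (nums : List Int) : Int :=
  ((PySem.List.enumerate nums 0).reverse).foldl
    (fun t p =>
      let base : Int := if PySem.Int.mod (PySem.Int.floordiv (p.1 + 1) 6) 2 != 0 then -1 else 1
      if PySem.Int.mod p.2 2 != 0 then -base * p.2 - t else base * p.2 + t) 0

-- ===== PRECONDITION & SPEC =====
def Spec_scoreDifference (nums : List Int) (out : Int) : Prop := out = scoreDifference_alt nums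
instance (nums : List Int) (out : Int) : Decidable (Spec_scoreDifference nums out) := by unfold Spec_scoreDifference; infer_instance

-- ===== CLAIM (what is proved, stated in full; the proofs are below) =====
def Claim_equal_scoreDifference : Prop := ∀ (nums : List Int), Dom_scoreDifference nums → Spec_scoreDifference nums (scoreDifference nums)

-- ===== LEMMAS AND PROOFS =====

-- the value B's backward loop computes for the suffix starting at index i (math form, Nat index)
def pvSuffix : Nat → List Int → Int
  | _, [] => 0
  | i, x :: xs =>
    let base : Int := if ((i + 1) / 6) % 2 == 1 then -1 else 1
    if x % 2 != 0 then -base * x - pvSuffix (i + 1) xs else base * x + pvSuffix (i + 1) xs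

-- B's port equals pvSuffix s, by foldl-on-reverse = foldr and induction on the list
lemma alt_suffix (xs : List Int) : ∀ (s : Nat),
    ((PySem.List.enumerate xs (s : Int)).reverse).foldl
      (fun t p =>
        let base : Int := if PySem.Int.mod (PySem.Int.floordiv (p.1 + 1) 6) 2 != 0 then -1 else 1
        if PySem.Int.mod p.2 2 != 0 then -base * p.2 - t else base * p.2 + t) 0
    = pvSuffix s xs := by
  induction xs with
  | nil => intro s; simp [PySem.List.enumerate_nil, pvSuffix]
  | cons x xs ih =>
    intro s
    rw [PySem.List.enumerate_cons]
    rw [List.reverse_cons, List.foldl_append]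
    have hcast : ((s : Int) + 1) = (((s + 1 : Nat) : Int)) := by push_cast; ring
    have hfd : PySem.Int.floordiv ((s : Int) + 1) 6 = (((s + 1) / 6 : Nat) : Int) := by
      rw [hcast]; exact_mod_cast PySem.Int.floordiv_natCast (s + 1) 6
    have hmod : PySem.Int.mod (((s + 1) / 6 : Nat) : Int) 2 = ((((s + 1) / 6) % 2 : Nat) : Int) := by
      exact_mod_cast PySem.Int.mod_natCast ((s + 1) / 6) 2
    have hxmod : PySem.Int.mod x 2 = x % 2 := PySem.Int.mod_eq_emod_of_pos (a := x) (by norm_num)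
    simp only [List.foldl_cons, List.foldl_nil, hfd, hmod, hxmod]
    have ihs := ih (s + 1)
    rw [show ((s : Int) + 1) = (((s + 1 : Nat)) : Int) from hcast] at *
    rw [ihs]
    simp only [pvSuffix]
    rcases Nat.mod_two_eq_zero_or_one ((s + 1) / 6) with h | h <;>
      simp [h]

-- A's loop with incoming index i and flag f equals res ± pvSuffix i, the sign recording whether
-- f agrees with the even-parity of i/6 (which it does initially: i = 0, f = true)
lemma goA_suffix (xs : List Int) : ∀ (i : Nat) (res : Int) (f : Bool),
    scoreDifferenceGoA xs i res f =
      res + (if f = ((i / 6) % 2 == 0) then 1 else -1) * pvSuffix i xs := by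
  induction xs with
  | nil => intro i res f; simp [scoreDifferenceGoA, pvSuffix]
  | cons x xs ih =>
    intro i res f
    simp only [scoreDifferenceGoA, pvSuffix]
    rw [ih]
    have hdiv : (i + 1) / 6 = i / 6 + (if (i + 1) % 6 = 0 then 1 else 0) := by
      split_ifs with h <;> omega
    by_cases h6 : (i + 1) % 6 = 0 <;> by_cases h2 : x % 2 = 0 <;> cases f <;>
      rcases Nat.mod_two_eq_zero_or_one (i / 6) with hq | hq <;>
      simp only [hdiv, h6, h2, hq, bne_self_eq_false, Bool.not_true,
        Bool.not_false, beq_iff_eq, bne_iff_ne, ne_eq, not_false_eq_true,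
        if_pos, if_neg] <;>
      simp [Nat.add_mod, hq] <;> ring

-- ===== VERDICT (by name: the statement is the Claim_ definition above) =====
theorem scoreDifference_spec : Claim_equal_scoreDifference := by
  intro nums _
  unfold Spec_scoreDifference scoreDifference scoreDifference_alt
  rw [goA_suffix]
  have := alt_suffix nums 0
  simpa using this.symm
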